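-- pv_equiv track=rewrite | github.com/burning-calamity/extirpation | src/extirpation/bundled_online/polyalpha_cycle.py | _transform
-- ===== SOURCE A (Python) =====
-- def _shift_char(ch: str, shift: int) -> str:
--     if "A" <= ch <= "Z":
--         return chr((ord(ch) - ord("A") + shift) % 26 + ord("A"))
--     if "a" <= ch <= "z":
--         return chr((ord(ch) - ord("a") + shift) % 26 + ord("a"))
--     return ch
--
-- def _transform(text: str, shifts: tuple[int, ...], direction: int) -> str:
--     if not shifts:
--         raise ValueError("shifts must be non-empty")
--     out: list[str] = []
--     idx = 0
--     for ch in text: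
--         if ch.isalpha():
--             shift = direction * shifts[idx % len(shifts)]
--             idx += 1
--             out.append(_shift_char(ch, shift))
--         else:
--             out.append(ch)
--     return "".join(out)
-- ===== SOURCE B (Python) =====
-- def _shift_char(ch: str, shift: int) -> str:
--     if "A" <= ch <= "Z":
--         return chr((ord(ch) - ord("A") + shift) % 26 + ord("A"))
--     if "a" <= ch <= "z":
--         return chr((ord(ch) - ord("a") + shift) % 26 + ord("a"))
--     return ch
--
-- def _transform(text: str, shifts: tuple[int, ...], direction: int) -> str:
--     if not shifts:
--         raise ValueError("shifts must be non-empty")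
--     n = len(shifts)
--     letters = [c for c in text if c.isalpha()]
--     transformed = [_shift_char(c, direction * shifts[i % n])
--                    for i, c in enumerate(letters)]
--     it = iter(transformed)
--     return "".join(next(it) if c.isalpha() else c for c in text)
-- ===== Notes on version B (the rewrite author's own statement) =====
-- stated objective: alternative
-- what changed: B replaces A's single stateful loop (running cipher index carried across iterations) with a two-phase decomposition: extract the alphabetic letters, transform them positionally via enumerate, then reinterleave them with the non-letters by pulling from an iterator.
import Mathlib
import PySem

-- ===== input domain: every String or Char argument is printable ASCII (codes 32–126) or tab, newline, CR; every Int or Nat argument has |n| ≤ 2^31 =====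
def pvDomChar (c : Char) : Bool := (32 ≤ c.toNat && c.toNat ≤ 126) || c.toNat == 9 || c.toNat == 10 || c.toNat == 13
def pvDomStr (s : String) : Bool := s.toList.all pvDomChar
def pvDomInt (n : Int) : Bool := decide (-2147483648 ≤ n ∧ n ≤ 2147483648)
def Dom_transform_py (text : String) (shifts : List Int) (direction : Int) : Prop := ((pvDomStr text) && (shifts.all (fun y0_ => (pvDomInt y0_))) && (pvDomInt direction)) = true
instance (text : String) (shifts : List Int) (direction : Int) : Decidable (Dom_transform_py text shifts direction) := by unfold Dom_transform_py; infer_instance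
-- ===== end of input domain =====

-- B re-implements A's single stateful cipher loop as a two-phase decomposition
-- (extract letters, transform positionally via enumerate, reinterleave): an
-- alternative of the same cost, proved to return the same string on Pre_.


-- ===== PORT A =====
-- _shift_char, shared by both Pythons verbatim (exact on ASCII: Lean's Int % is
-- `emod`, which agrees with Python's % for the positive divisor 26)
def pyShiftChar (ch : Char) (shift : Int) : Char :=
  if 'A' ≤ ch ∧ ch ≤ 'Z' then
    Char.ofNat ((((ch.toNat : Int) - 65 + shift) % 26 + 65).toNat)
  else if 'a' ≤ ch ∧ ch ≤ 'z' then
    Char.ofNat ((((ch.toNat : Int) - 97 + shift) % 26 + 97).toNat)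
  else ch

-- the expression `direction * shifts[idx % len(shifts)]`, shared by both Pythons
-- (idx is always ≥ 0 in both, so it is a Nat; within Pre_ the index is in range)
def pyShiftOf (shifts : List Int) (direction : Int) (idx : Nat) : Int :=
  direction * shifts.getD (idx % shifts.length) 0

-- one iteration of A's `for ch in text:` loop; state = (out, idx)
def aStep (shifts : List Int) (direction : Int) (st : List Char × Nat) (ch : Char) :
    List Char × Nat :=
  if PySem.Chars.isalpha ch then
    (st.1 ++ [pyShiftChar ch (pyShiftOf shifts direction st.2)], st.2 + 1)
  else
    (st.1 ++ [ch], st.2)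

def transform_py (text : String) (shifts : List Int) (direction : Int) : String :=
  String.mk (text.toList.foldl (aStep shifts direction) ([], 0)).1

-- ===== PORT B =====
-- rebuild pass: emit the next transformed letter at each alphabetic position,
-- other characters unchanged (`next(it)` never hits an exhausted iterator)
def bRebuild : List Char → List Char → List Char
  | [], _ => []
  | c :: cs, ts =>
    if PySem.Chars.isalpha c then
      match ts with
      | t :: ts' => t :: bRebuild cs ts'
      | [] => []  -- unreachable: transformed has one entry per alphabetic char
    else c :: bRebuild cs ts

def transform_py_alt (text : String) (shifts : List Int) (direction : Int) : String :=
  let letters := text.toList.filter PySem.Chars.isalpha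
  let transformed := (PySem.List.enumerate letters).map
    (fun p => pyShiftChar p.2 (pyShiftOf shifts direction p.1.toNat))
  String.mk (bRebuild text.toList transformed)

-- ===== PRECONDITION & SPEC =====
-- Pre_ excludes exactly the inputs where A raises ValueError ("shifts must be non-empty")
def Pre_transform_py (text : String) (shifts : List Int) (direction : Int) : Prop :=
  shifts ≠ []
instance (text : String) (shifts : List Int) (direction : Int) :
    Decidable (Pre_transform_py text shifts direction) := by
  unfold Pre_transform_py; infer_instance

def pvWitness_transform_py : String × List Int × Int := ("Ab c!", [1, 2], 1)

def Spec_transform_py (text : String) (shifts : List Int) (direction : Int) (out : String) : Prop := out = transform_py_alt text shifts direction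
instance (text : String) (shifts : List Int) (direction : Int) (out : String) : Decidable (Spec_transform_py text shifts direction out) := by unfold Spec_transform_py; infer_instance

-- ===== CLAIM (what is proved, stated in full; the proofs are below) =====
def Claim_equal_transform_py : Prop := ∀ (text : String) (shifts : List Int) (direction : Int), Dom_transform_py text shifts direction → Pre_transform_py text shifts direction → Spec_transform_py text shifts direction (transform_py text shifts direction)

-- ===== LEMMAS AND PROOFS =====

-- reference recursion: the list of output characters of A's loop from index idx
def aGo (shifts : List Int) (direction : Int) : List Char → Nat → List Char
  | [], _ => []
  | c :: cs, idx =>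
    if PySem.Chars.isalpha c then
      pyShiftChar c (pyShiftOf shifts direction idx) :: aGo shifts direction cs (idx + 1)
    else c :: aGo shifts direction cs idx

theorem aStep_foldl (shifts : List Int) (direction : Int) (cs : List Char) :
    ∀ (out : List Char) (idx : Nat),
      (cs.foldl (aStep shifts direction) (out, idx)).1 = out ++ aGo shifts direction cs idx := by
  induction cs with
  | nil => intro out idx; simp [aGo]
  | cons c cs ih =>
    intro out idx
    by_cases h : PySem.Chars.isalpha c = true <;>
      simp [aStep, aGo, h, ih, List.append_assoc]

theorem bRebuild_eq (shifts : List Int) (direction : Int) (cs : List Char) :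
    ∀ (idx : Nat),
      bRebuild cs ((PySem.List.enumerate (cs.filter PySem.Chars.isalpha) ((idx : Nat) : Int)).map
          (fun p => pyShiftChar p.2 (pyShiftOf shifts direction p.1.toNat)))
        = aGo shifts direction cs idx := by
  induction cs with
  | nil => intro idx; simp [bRebuild, aGo, PySem.List.enumerate_nil]
  | cons c cs ih =>
    intro idx
    by_cases h : PySem.Chars.isalpha c = true
    · have hcast : ((idx : Nat) : Int) + 1 = ((idx + 1 : Nat) : Int) := by push_cast; ring
      simp only [List.filter_cons, h, if_pos, PySem.List.enumerate_cons, List.map_cons,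
        bRebuild, aGo, hcast, ih (idx + 1), Int.toNat_natCast]
    · simp only [List.filter_cons, h, Bool.false_eq_true, if_neg, not_false_iff, bRebuild, aGo]
      rw [ih idx]

-- ===== VERDICT (by name: the statement is the Claim_ definition above) =====
theorem transform_py_spec : Claim_equal_transform_py := by
  intro text shifts direction _dom _pre
  unfold Spec_transform_py transform_py transform_py_alt
  rw [aStep_foldl]
  exact congrArg String.mk (by simpa using (bRebuild_eq shifts direction text.toList 0).symm)
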